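-- pv_equiv track=rewrite | github.com/petru-braha/class-python | lab03/ex03.py | contingent_sets
-- ===== SOURCE A (Python) =====
-- def contingent_sets(a, b):
--   first_set = set(a)
--   second_set = set(b)
--
--   difference0 = first_set - second_set
--   difference1 = second_set - first_set
--
--   intersection = first_set - difference0
--
--   for element in second_set:
--     first_set.add(element)
--   return (intersection, first_set, difference0, difference1)
-- ===== SOURCE B (Python) =====
-- def contingent_sets(a, b):
--   # Tag each element with which side(s) it belongs to: 1 = only a, 2 = only b, 3 = both.
--   tags = {}
--   for x in set(a):
--     tags[x] = 1
--   for y in set(b):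
--     tags[y] = tags.get(y, 0) + 2
--
--   intersection = {k for k, t in tags.items() if t == 3}
--   union = {k for k in tags}
--   difference0 = {k for k, t in tags.items() if t == 1}
--   difference1 = {k for k, t in tags.items() if t == 2}
--   return (intersection, union, difference0, difference1)
-- ===== Notes on version B (the rewrite author's own statement) =====
-- stated objective: alternative
-- what changed: Replaces A's set-difference algebra (three '-' operations plus a union-by-mutation loop) with a side-tag dictionary: one merged dict maps each element to a tag (1 = only a, 2 = only b, 3 = both) and all four result sets are read off the dict's items by their tag, with no set operations or membership tests at all.
import Mathlib
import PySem

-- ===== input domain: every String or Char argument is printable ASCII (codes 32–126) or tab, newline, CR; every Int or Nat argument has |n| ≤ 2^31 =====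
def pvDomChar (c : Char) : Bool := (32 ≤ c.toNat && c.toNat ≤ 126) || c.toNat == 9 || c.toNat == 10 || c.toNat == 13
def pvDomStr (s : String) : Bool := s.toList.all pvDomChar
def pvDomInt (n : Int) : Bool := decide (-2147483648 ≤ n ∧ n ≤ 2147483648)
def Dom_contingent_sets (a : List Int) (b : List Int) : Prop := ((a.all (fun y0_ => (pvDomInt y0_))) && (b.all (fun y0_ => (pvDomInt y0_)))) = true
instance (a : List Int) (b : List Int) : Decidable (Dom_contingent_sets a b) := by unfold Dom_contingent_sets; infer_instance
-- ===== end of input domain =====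

-- B replaces A's set-difference algebra with a side-tag dictionary read off by tag (objective: alternative, same cost).

-- ===== PORT A =====
def contingent_sets (a : List Int) (b : List Int) : List Int × List Int × List Int × List Int :=
  let first_set := PySem.Set.ofList a
  let second_set := PySem.Set.ofList b
  let difference0 := PySem.Set.diff first_set second_set
  let difference1 := PySem.Set.diff second_set first_set
  let intersection := PySem.Set.diff first_set difference0
  -- for element in second_set: first_set.add(element)
  let first_set := second_set.foldl (fun s element => PySem.Set.add s element) first_set
  (intersection, first_set, difference0, difference1)

-- ===== PORT B =====
def contingent_sets_alt (a : List Int) (b : List Int) : List Int × List Int × List Int × List Int :=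
  -- for x in set(a): tags[x] = 1
  let tags : PySem.Dict Int Int :=
    (PySem.Set.ofList a).foldl (fun d x => d.insert x 1) PySem.Dict.empty
  -- for y in set(b): tags[y] = tags.get(y, 0) + 2
  let tags := (PySem.Set.ofList b).foldl (fun d y => d.insert y (d.getD y 0 + 2)) tags
  let intersection := PySem.Set.ofList (((tags.items.filter (fun p => p.2 == 3)).map (·.1)))
  let union := PySem.Set.ofList tags.keys
  let difference0 := PySem.Set.ofList (((tags.items.filter (fun p => p.2 == 1)).map (·.1)))
  let difference1 := PySem.Set.ofList (((tags.items.filter (fun p => p.2 == 2)).map (·.1)))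
  (intersection, union, difference0, difference1)

-- ===== PRECONDITION & SPEC =====
def Spec_contingent_sets (a : List Int) (b : List Int) (out : List Int × List Int × List Int × List Int) : Prop := out = contingent_sets_alt a b
instance (a : List Int) (b : List Int) (out : List Int × List Int × List Int × List Int) : Decidable (Spec_contingent_sets a b out) := by unfold Spec_contingent_sets; infer_instance

-- ===== CLAIM (what is proved, stated in full; the proofs are below) =====
def Claim_equal_contingent_sets : Prop := ∀ (a : List Int) (b : List Int), Dom_contingent_sets a b → Spec_contingent_sets a b (contingent_sets a b)

-- ===== LEMMAS AND PROOFS =====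

-- B's first loop: every key of l ends holding tag 1, others keep their value.
theorem pv_getD_loop1 (l : List Int) (d : PySem.Dict Int Int) (v : Int) :
    ((l.foldl (fun d x => d.insert x (1 : Int)) d).getD v 0)
      = if v ∈ l then 1 else d.getD v 0 := by
  induction l generalizing d with
  | nil => simp
  | cons x t ih =>
    simp only [List.foldl_cons, ih, PySem.Dict.getD_insert, List.mem_cons]
    by_cases hvt : v ∈ t <;> by_cases hvx : v = x <;> simp [hvt, hvx]

-- B's second loop, over a duplicate-free list: each key of l gains 2, others keep their value.
theorem pv_getD_loop2 (l : List Int) (d : PySem.Dict Int Int) (v : Int) (hl : l.Nodup) :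
    ((l.foldl (fun d y => d.insert y (d.getD y 0 + 2)) d).getD v 0)
      = if v ∈ l then d.getD v 0 + 2 else d.getD v 0 := by
  induction l generalizing d with
  | nil => simp
  | cons y t ih =>
    have hyt : y ∉ t := (List.nodup_cons.mp hl).1
    have ht : t.Nodup := (List.nodup_cons.mp hl).2
    simp only [List.foldl_cons, ih _ ht, PySem.Dict.getD_insert, List.mem_cons]
    by_cases hvt : v ∈ t
    · have : v ≠ y := fun h => hyt (h ▸ hvt)
      simp [hvt, this]
    · by_cases hvy : v = y
      · simp [hvy, hyt]
      · simp [hvt, hvy]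

-- Selecting keys by tag from items of a dict given as keys.map (k, g k) is a filter on the keys.
theorem pv_select (ks : List Int) (g : Int → Int) (c : Int) :
    ((ks.map (fun k => (k, g k))).filter (fun p => p.2 == c)).map (·.1)
      = ks.filter (fun k => g k == c) := by
  induction ks with
  | nil => rfl
  | cons k t ih =>
    simp only [List.map_cons, List.filter_cons]
    by_cases h : g k == c
    · simp [h, ih]
    · simp [h, ih]

-- A's intersection first_set - (first_set - second_set) filters first_set by membership in second_set.
theorem pv_inter (fs ss : List Int) :
    PySem.Set.diff fs (PySem.Set.diff fs ss) = fs.filter (fun x => PySem.Set.contains ss x) := by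
  show fs.filter _ = fs.filter _
  apply List.filter_congr
  intro x hx
  by_cases hm : x ∈ ss
  · have h2 : x ∉ PySem.Set.diff fs ss := fun hcontra =>
      ((PySem.Set.mem_diff _ _ _).mp hcontra).2 hm
    simp [hm, h2]
  · have h2 : x ∈ PySem.Set.diff fs ss := (PySem.Set.mem_diff _ _ _).mpr ⟨hx, hm⟩
    simp [hm, h2]

-- ===== VERDICT (by name: the statement is the Claim_ definition above) =====
theorem contingent_sets_spec : Claim_equal_contingent_sets := by
  intro a b _
  unfold Spec_contingent_sets contingent_sets contingent_sets_alt
  dsimp only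
  set fs := PySem.Set.ofList a with hfs
  set ss := PySem.Set.ofList b with hss
  have hfsn : fs.Nodup := PySem.Set.nodup_ofList a
  have hssn : ss.Nodup := PySem.Set.nodup_ofList b
  set tags := ss.foldl (fun d y => d.insert y (d.getD y 0 + 2))
      (fs.foldl (fun d x => d.insert x (1 : Int)) PySem.Dict.empty) with htags
  -- keys of tags: first_set followed by the fresh elements of second_set
  have hkeys : tags.keys = fs ++ ss.filter (fun y => !PySem.Set.contains fs y) := by
    rw [htags, PySem.Dict.keys_foldl_insert, PySem.Dict.keys_foldl_insert]
    have h0 : PySem.Set.update (PySem.Dict.empty : PySem.Dict Int Int).keys fs = fs := by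
      rw [PySem.Dict.keys_empty, PySem.Set.update_nil_left,
        PySem.Set.ofList_eq_self_of_nodup _ hfsn]
    rw [h0, PySem.Set.update_eq_append_filter, PySem.Set.ofList_eq_self_of_nodup _ hssn]
  have hkeysn : tags.keys.Nodup := by
    rw [htags]
    exact PySem.Dict.nodup_keys_foldl_insert _ _ _
      (PySem.Dict.nodup_keys_foldl_insert _ _ _ PySem.Dict.nodup_keys_empty)
  -- the tag of each element
  have htag : ∀ v, tags.getD v 0
      = (if v ∈ ss then (2 : Int) else 0) + (if v ∈ fs then 1 else 0) := by
    intro v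
    rw [htags, pv_getD_loop2 _ _ _ hssn, pv_getD_loop1]
    by_cases h1 : v ∈ ss <;> by_cases h2 : v ∈ fs <;>
      simp [h1, h2, PySem.Dict.getD_empty]
  have hitems : tags.items = tags.keys.map (fun k => (k, tags.getD k 0)) :=
    PySem.Dict.items_eq_map_keys tags hkeysn 0
  rw [hitems, pv_select, pv_select, pv_select, hkeys]
  have hkeysn' : (fs ++ ss.filter (fun y => !PySem.Set.contains fs y)).Nodup := hkeys ▸ hkeysn
  simp only [List.filter_append]
  -- piecewise computation of the three tag filters
  have hf3 : fs.filter (fun k => tags.getD k 0 == 3) = fs.filter (fun x => PySem.Set.contains ss x) := by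
    apply List.filter_congr
    intro x hx
    rw [htag x]
    by_cases h : x ∈ ss <;> simp [h, hx]
  have hs3 : (ss.filter (fun y => !PySem.Set.contains fs y)).filter (fun k => tags.getD k 0 == 3) = [] := by
    rw [List.filter_eq_nil_iff]
    intro y hy
    have hyss : y ∈ ss := List.mem_of_mem_filter hy
    have hynf : y ∉ fs := by
      have := List.of_mem_filter hy
      simpa using this
    rw [htag y]
    simp [hyss, hynf]
  have hf1 : fs.filter (fun k => tags.getD k 0 == 1) = fs.filter (fun x => !PySem.Set.contains ss x) := by
    apply List.filter_congr
    intro x hx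
    rw [htag x]
    by_cases h : x ∈ ss <;> simp [h, hx]
  have hs1 : (ss.filter (fun y => !PySem.Set.contains fs y)).filter (fun k => tags.getD k 0 == 1) = [] := by
    rw [List.filter_eq_nil_iff]
    intro y hy
    have hyss : y ∈ ss := List.mem_of_mem_filter hy
    have hynf : y ∉ fs := by
      have := List.of_mem_filter hy
      simpa using this
    rw [htag y]
    simp [hyss, hynf]
  have hf2 : fs.filter (fun k => tags.getD k 0 == 2) = [] := by
    rw [List.filter_eq_nil_iff]
    intro x hx
    rw [htag x]
    by_cases h : x ∈ ss <;> simp [h, hx]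
  have hs2 : (ss.filter (fun y => !PySem.Set.contains fs y)).filter (fun k => tags.getD k 0 == 2)
      = ss.filter (fun y => !PySem.Set.contains fs y) := by
    rw [List.filter_eq_self]
    intro y hy
    have hyss : y ∈ ss := List.mem_of_mem_filter hy
    have hynf : y ∉ fs := by
      have := List.of_mem_filter hy
      simpa using this
    rw [htag y]
    simp [hyss, hynf]
  rw [hf3, hs3, hf1, hs1, hf2, hs2]
  refine Prod.ext ?_ (Prod.ext ?_ (Prod.ext ?_ ?_))
  · -- intersection
    show PySem.Set.diff fs (PySem.Set.diff fs ss) = _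
    rw [pv_inter, List.append_nil,
      PySem.Set.ofList_eq_self_of_nodup _ (hfsn.filter _)]
  · -- union
    show ss.foldl (fun s element => PySem.Set.add s element) fs = _
    rw [PySem.Set.ofList_eq_self_of_nodup _ hkeysn']
    show PySem.Set.update fs ss = _
    rw [PySem.Set.update_eq_append_filter, PySem.Set.ofList_eq_self_of_nodup _ hssn]
  · -- difference0
    show PySem.Set.diff fs ss
        = PySem.Set.ofList (fs.filter (fun x => !PySem.Set.contains ss x) ++ [])
    rw [List.append_nil, PySem.Set.ofList_eq_self_of_nodup _ (hfsn.filter _)]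
    rfl
  · -- difference1
    show PySem.Set.diff ss fs
        = PySem.Set.ofList ([] ++ ss.filter (fun y => !PySem.Set.contains fs y))
    rw [List.nil_append, PySem.Set.ofList_eq_self_of_nodup _ (hssn.filter _)]
    rfl
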